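-- pv_equiv track=rewrite | github.com/Yass2501/BDK_RMR_py_7.0 | src/functions.py | getNameFromID
-- ===== SOURCE A (Python) =====
-- def getNameFromID(ID, id_name_map):
--     TrainName = ''
--     for line in id_name_map:
--         Id = line[0:line.find('\t')]
--         Name = line[line.find('\t')+1:len(line)-1]
--         if(ID == Id):
--             TrainName = Name
--             break
--     return TrainName
-- ===== SOURCE B (Python) =====
-- def getNameFromID(ID, id_name_map):
--     table = {}
--     for line in id_name_map:
--         t = line.find('\t')
--         Id = line[0:t]
--         Name = line[t+1:len(line)-1]
--         if Id not in table:
--             table[Id] = Name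
--     return table.get(ID, '')
-- ===== Notes on version B (the rewrite author's own statement) =====
-- stated objective: alternative
-- what changed: Replaces A's early-break linear scan with an eager one-pass build of a first-occurrence-wins dict over all lines followed by a single lookup with default ''.
import Mathlib
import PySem

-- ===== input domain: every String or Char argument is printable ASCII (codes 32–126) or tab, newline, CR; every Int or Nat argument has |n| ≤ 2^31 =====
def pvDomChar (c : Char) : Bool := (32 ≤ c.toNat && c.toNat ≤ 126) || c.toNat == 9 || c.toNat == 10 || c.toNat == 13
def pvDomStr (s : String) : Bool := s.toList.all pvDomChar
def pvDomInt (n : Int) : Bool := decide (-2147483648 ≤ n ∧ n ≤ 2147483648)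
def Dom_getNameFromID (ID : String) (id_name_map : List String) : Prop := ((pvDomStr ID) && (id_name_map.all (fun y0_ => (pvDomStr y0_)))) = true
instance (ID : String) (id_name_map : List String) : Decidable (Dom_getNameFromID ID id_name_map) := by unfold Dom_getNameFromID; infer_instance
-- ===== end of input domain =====

-- B replaces A's early-break scan by an eager first-wins dict build over all lines plus one lookup (alternative decomposition, same cost).

-- ===== PORT A =====
-- A's for-loop with break: recursion stops at the first line whose Id equals ID.
def pvALoop (ID : String) : List String → String
  | [] => ""
  | line :: rest =>
    let t := PySem.Str.find line "\t"
    let Id := PySem.Str.slice line (some 0) (some t)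
    let Name := PySem.Str.slice line (some (t + 1)) (some ((PySem.Str.len line : Int) - 1))
    if ID = Id then Name else pvALoop ID rest

def getNameFromID (ID : String) (id_name_map : List String) : String :=
  pvALoop ID id_name_map

-- ===== PORT B =====
def getNameFromID_alt (ID : String) (id_name_map : List String) : String :=
  let table : PySem.Dict String String :=
    id_name_map.foldl (fun d line =>
      let t := PySem.Str.find line "\t"
      let Id := PySem.Str.slice line (some 0) (some t)
      let Name := PySem.Str.slice line (some (t + 1)) (some ((PySem.Str.len line : Int) - 1))
      if d.contains Id then d else d.insert Id Name) PySem.Dict.empty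
  table.getD ID ""

-- ===== PRECONDITION & SPEC =====
def Spec_getNameFromID (ID : String) (id_name_map : List String) (out : String) : Prop := out = getNameFromID_alt ID id_name_map
instance (ID : String) (id_name_map : List String) (out : String) : Decidable (Spec_getNameFromID ID id_name_map out) := by unfold Spec_getNameFromID; infer_instance

-- ===== CLAIM (what is proved, stated in full; the proofs are below) =====
def Claim_equal_getNameFromID : Prop := ∀ (ID : String) (id_name_map : List String), Dom_getNameFromID ID id_name_map → Spec_getNameFromID ID id_name_map (getNameFromID ID id_name_map)

-- ===== LEMMAS AND PROOFS =====

def pvParse (line : String) : String × String :=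
  let t := PySem.Str.find line "\t"
  (PySem.Str.slice line (some 0) (some t),
   PySem.Str.slice line (some (t + 1)) (some ((PySem.Str.len line : Int) - 1)))

def pvStep (d : PySem.Dict String String) (line : String) : PySem.Dict String String :=
  if d.contains (pvParse line).1 then d else d.insert (pvParse line).1 (pvParse line).2

lemma pvAlt_eq (ID : String) (lines : List String) :
    getNameFromID_alt ID lines = (lines.foldl pvStep PySem.Dict.empty).getD ID "" := rfl

lemma pvALoop_cons (ID line : String) (rest : List String) :
    pvALoop ID (line :: rest) =
      if ID = (pvParse line).1 then (pvParse line).2 else pvALoop ID rest := rfl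

lemma pv_key (ID : String) (lines : List String) : ∀ d : PySem.Dict String String,
    (lines.foldl pvStep d).getD ID "" =
      if d.contains ID then d.getD ID "" else pvALoop ID lines := by
  induction lines with
  | nil =>
    intro d
    by_cases hc : d.contains ID
    · simp [hc]
    · simp only [Bool.not_eq_true] at hc
      simp [hc, PySem.Dict.getD_of_not_contains (h := hc), pvALoop]
  | cons line rest ih =>
    intro d
    rw [List.foldl_cons, pvALoop_cons]
    show (rest.foldl pvStep (pvStep d line)).getD ID "" = _
    rw [ih]
    unfold pvStep
    by_cases hk : d.contains (pvParse line).1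
    · rw [if_pos hk]
      by_cases hc : d.contains ID
      · simp [hc]
      · simp only [hc]
        by_cases hid : ID = (pvParse line).1
        · subst hid; simp [hk] at hc
        · simp [hid]
    · rw [if_neg hk]
      rw [PySem.Dict.contains_insert, PySem.Dict.getD_insert]
      by_cases hid : ID = (pvParse line).1
      · subst hid
        simp [hk]
      · have hbeq : (ID == (pvParse line).1) = false := by
          simp [hid]
        simp [hbeq, hid]

-- ===== VERDICT (by name: the statement is the Claim_ definition above) =====
theorem getNameFromID_spec : Claim_equal_getNameFromID := by
  intro ID lines _
  unfold Spec_getNameFromID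
  rw [pvAlt_eq, pv_key]
  simp [getNameFromID]
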